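-- pv_equiv track=rewrite | github.com/hyeonji7557/Algorithm | src/Python/Lv1_이상한문자만들기.py | solution
-- ===== SOURCE A (Python) =====
-- def solution(s):
--     words = s.split(" ")
--     answer = []
--     for word in words:
--         a = ""
--         for i in range(len(word)):
--             if i % 2 == 0:
--                 a += word[i].upper()
--             else:
--                 a += word[i].lower()
--         answer.append(a)
--     return " ".join(answer)
-- ===== SOURCE B (Python) =====
-- def solution(s):
--     res = []
--     i = 0
--     for c in s:
--         if c == " ":
--             res.append(" ")
--             i = 0
--         else:
--             res.append(c.upper() if i % 2 == 0 else c.lower())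
--             i += 1
--     return "".join(res)
-- ===== Notes on version B (the rewrite author's own statement) =====
-- stated objective: alternative
-- what changed: Replaces split-into-words, nested index loop per word and ' '.join by one flat pass over the characters with a position counter that resets on every space.
import Mathlib
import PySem

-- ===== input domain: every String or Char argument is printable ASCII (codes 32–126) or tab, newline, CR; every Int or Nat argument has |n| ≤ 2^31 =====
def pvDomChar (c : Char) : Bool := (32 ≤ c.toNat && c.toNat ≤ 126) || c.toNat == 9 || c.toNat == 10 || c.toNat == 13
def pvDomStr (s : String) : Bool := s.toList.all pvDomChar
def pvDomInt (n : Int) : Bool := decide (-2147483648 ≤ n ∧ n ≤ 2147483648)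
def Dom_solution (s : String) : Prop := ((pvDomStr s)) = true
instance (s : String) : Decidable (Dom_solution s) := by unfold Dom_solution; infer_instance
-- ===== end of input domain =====

-- B replaces A's split-into-words / nested index loop / " ".join by one flat pass with a counter reset on spaces (same cost).

-- ===== PORT A =====
def solution (s : String) : String :=
  String.ofList (PySem.Chars.join [' ']
    ((PySem.Chars.splitOn s.toList [' ']).foldl (fun ans w =>
      ans ++ [(PySem.List.pyRange 0 (w.length) 1).foldl
        (fun a i => a ++ (if PySem.Int.mod i 2 = 0
           then PySem.Chars.upper [PySem.List.pyGetD w i ' ']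
           else PySem.Chars.lower [PySem.List.pyGetD w i ' '])) []]) []))

-- ===== PORT B =====
def solution_alt (s : String) : String :=
  String.ofList (s.toList.foldl (fun (st : List Char × Int) c =>
      if c = ' ' then (st.1 ++ [' '], 0)
      else (st.1 ++ [if PySem.Int.mod st.2 2 = 0 then PySem.Chars.upperChar c
                     else PySem.Chars.lowerChar c], st.2 + 1))
    ([], 0)).1

-- ===== PRECONDITION & SPEC =====
def Spec_solution (s : String) (out : String) : Prop := out = solution_alt s
instance (s : String) (out : String) : Decidable (Spec_solution s out) := by unfold Spec_solution; infer_instance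

-- ===== CLAIM (what is proved, stated in full; the proofs are below) =====
def Claim_equal_solution : Prop := ∀ (s : String), Dom_solution s → Spec_solution s (solution s)

-- ===== LEMMAS AND PROOFS =====

/-- the alternating-case transform of one character at word position `i` -/
def pvG (c : Char) (i : Int) : Char :=
  if PySem.Int.mod i 2 = 0 then PySem.Chars.upperChar c else PySem.Chars.lowerChar c

/-- one word processed from position `i` on -/
def pvMixW : List Char → Int → List Char
  | [], _ => []
  | c :: rest, i => pvG c i :: pvMixW rest (i + 1)

/-- the whole string processed in one pass, counter `i`, reset on spaces -/
def pvMix : List Char → Int → List Char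
  | [], _ => []
  | c :: rest, i =>
      if c = ' ' then ' ' :: pvMix rest 0 else pvG c i :: pvMix rest (i + 1)

/-- structural split on single spaces (Python's s.split(" ")) -/
def pvSp : List Char → List (List Char)
  | [] => [[]]
  | c :: rest =>
      if c = ' ' then [] :: pvSp rest
      else (c :: (pvSp rest).head!) :: (pvSp rest).tail

lemma pvSp_ne_nil (l : List Char) : pvSp l ≠ [] := by
  cases l with
  | nil => simp [pvSp]
  | cons c rest => by_cases h : c = ' ' <;> simp [pvSp, h]

lemma pvGo_eq (fuel : Nat) : ∀ (l cur : List Char) (acc : List (List Char)),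
    l.length < fuel →
    PySem.Chars.splitOn.go [' '] fuel l cur acc =
      acc.reverse ++ (cur.reverse ++ (pvSp l).head!) :: (pvSp l).tail := by
  induction fuel with
  | zero => intro l cur acc h; omega
  | succ f ih =>
    intro l cur acc h
    cases l with
    | nil => simp [PySem.Chars.splitOn.go, pvSp]
    | cons c rest =>
      by_cases hc : c = ' '
      · subst hc
        have : PySem.Chars.splitOn.go [' '] (f+1) (' ' :: rest) cur acc =
            PySem.Chars.splitOn.go [' '] f rest [] (cur.reverse :: acc) := by
          simp [PySem.Chars.splitOn.go, List.isPrefixOf]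
        rw [this, ih rest [] (cur.reverse :: acc) (by simp at h; omega)]
        simp [pvSp, List.cons_head!_tail (pvSp_ne_nil rest)]
      · have : PySem.Chars.splitOn.go [' '] (f+1) (c :: rest) cur acc =
            PySem.Chars.splitOn.go [' '] f rest (c :: cur) acc := by
          simp [PySem.Chars.splitOn.go, List.isPrefixOf, Ne.symm hc]
        rw [this, ih rest (c :: cur) acc (by simp at h; omega)]
        simp [pvSp, hc]

lemma pvSplitOn_eq (l : List Char) :
    PySem.Chars.splitOn l [' '] = pvSp l := by
  have := pvGo_eq (l.length + 1) l [] [] (by omega)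
  simp only [PySem.Chars.splitOn] at *
  rw [this]
  simp [List.cons_head!_tail (pvSp_ne_nil l)]

/-- A's inner index loop over one word is the structural word pass -/
lemma pvWordA_eq : ∀ (v u a : List Char),
    (PySem.List.pyRange (u.length) (u.length + v.length) 1).foldl
      (fun a i => a ++ (if PySem.Int.mod i 2 = 0
         then PySem.Chars.upper [PySem.List.pyGetD (u ++ v) i ' ']
         else PySem.Chars.lower [PySem.List.pyGetD (u ++ v) i ' '])) a
    = a ++ pvMixW v u.length := by
  intro v
  induction v with
  | nil =>
    intro u a
    rw [PySem.List.pyRange_one_eq_nil (by simp)]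
    simp [pvMixW]
  | cons c rest ih =>
    intro u a
    have hlt : (u.length : Int) < (u.length : Int) + ((c :: rest).length : Int) := by
      simp only [List.length_cons]; push_cast; omega
    rw [PySem.List.pyRange_one_cons hlt]
    simp only [List.foldl_cons]
    have hget : PySem.List.pyGetD (u ++ c :: rest) (u.length : Int) ' ' = c := by
      rw [PySem.List.pyGetD_natCast]
      rw [List.getD_eq_getElem?_getD, List.getElem?_append_right (le_refl u.length)]
      simp
    have harith : (u.length : Int) + ((c :: rest).length : Int) =
        (((u ++ [c]).length : Nat) : Int) + (rest.length : Int) := by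
      simp only [List.length_cons, List.length_append, List.length_cons, List.length_nil]
      push_cast; ring
    have hstart : (u.length : Int) + 1 = (((u ++ [c]).length : Nat) : Int) := by
      simp only [List.length_append, List.length_cons, List.length_nil]
      push_cast; ring
    have hlist : u ++ c :: rest = (u ++ [c]) ++ rest := by simp
    rw [hget, harith, hstart, hlist, ih (u ++ [c])]
    simp only [pvMixW, pvG, ← hstart, PySem.Chars.upper, PySem.Chars.lower, List.map]
    split <;> simp

/-- B's flat fold is the structural one-pass -/
lemma pvB_fold : ∀ (cs : List Char) (a : List Char) (i : Int),
    (cs.foldl (fun (st : List Char × Int) c =>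
      if c = ' ' then (st.1 ++ [' '], 0)
      else (st.1 ++ [if PySem.Int.mod st.2 2 = 0 then PySem.Chars.upperChar c
                     else PySem.Chars.lowerChar c], st.2 + 1)) (a, i)).1
    = a ++ pvMix cs i := by
  intro cs
  induction cs with
  | nil => intro a i; simp [pvMix]
  | cons c rest ih =>
    intro a i
    simp only [List.foldl_cons]
    by_cases hc : c = ' '
    · rw [if_pos hc, ih]
      simp [pvMix, hc]
    · rw [if_neg hc, ih]
      simp only [pvMix, pvG, if_neg hc]
      simp

/-- the one-pass equals the per-word passes stitched with spaces -/
lemma pvMix_eq : ∀ (cs : List Char) (i : Int),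
    pvMix cs i = pvMixW (pvSp cs).head! i ++
      (pvSp cs).tail.flatMap (fun w => ' ' :: pvMixW w 0) := by
  intro cs
  induction cs with
  | nil => intro i; simp [pvMix, pvSp, pvMixW]
  | cons c rest ih =>
    intro i
    by_cases hc : c = ' '
    · obtain ⟨w0, ws, hsp⟩ := List.exists_cons_of_ne_nil (pvSp_ne_nil rest)
      simp [hc, pvMix, pvSp, pvMixW, ih 0, hsp]
    · simp [hc, pvMix, pvSp, pvMixW, ih (i + 1)]

/-- " ".join over the mapped words, in flat form -/
lemma pvJoin_words (f : List Char → List Char) :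
    ∀ (ws : List (List Char)) (w : List Char),
    PySem.Chars.join [' '] ((w :: ws).map f) =
      f w ++ ws.flatMap (fun x => ' ' :: f x) := by
  intro ws
  induction ws with
  | nil => intro w; simp [PySem.Chars.join_singleton]
  | cons w1 ws ih =>
    intro w
    rw [List.map_cons, List.map_cons, PySem.Chars.join_cons_cons, ← List.map_cons, ih w1]
    simp

-- ===== VERDICT (by name: the statement is the Claim_ definition above) =====
theorem solution_spec : Claim_equal_solution := by
  intro s _
  unfold Spec_solution solution solution_alt
  rw [pvSplitOn_eq, pvB_fold s.toList [] 0, pvMix_eq s.toList 0]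
  obtain ⟨w0, ws, hsp⟩ := List.exists_cons_of_ne_nil (pvSp_ne_nil s.toList)
  rw [hsp, PySem.List.foldl_append_singleton_eq_map]
  have hA : ∀ w : List Char,
      (PySem.List.pyRange 0 (w.length) 1).foldl
        (fun a i => a ++ (if PySem.Int.mod i 2 = 0
           then PySem.Chars.upper [PySem.List.pyGetD w i ' ']
           else PySem.Chars.lower [PySem.List.pyGetD w i ' '])) []
      = pvMixW w 0 := by
    intro w
    have := pvWordA_eq w [] []
    simpa using this
  simp only [hA, List.nil_append, List.head!_cons, List.tail_cons]
  rw [pvJoin_words (fun w => pvMixW w 0) ws w0]
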